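-- pv_equiv track=rewrite | github.com/mr-moshtaghi/download_manager_async | function_utils_size.py | calc_file_chunks
-- ===== SOURCE A (Python) =====
-- from math import ceil
--
-- def calc_file_chunks(
--         file_size: int,
--         min_chunk_size: int = None,
--         max_chunk_size: int = None,
-- ) -> tuple:
--     if min_chunk_size is None:
--         min_chunk_size = 10 * 1024 * 1024  # 10 MB
--
--     if max_chunk_size is None:
--         max_chunk_size = 100 * 1024 * 1024  # 100 MB
--
--     default_total_parts = 3
--     splitted_parts = []
--
--     while (
--             ceil(file_size / min_chunk_size) < default_total_parts and
--             default_total_parts > 1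
--     ):
--         default_total_parts -= 1
--
--     while (
--             ceil(file_size / max_chunk_size) > default_total_parts and
--             default_total_parts < 6
--     ):
--         default_total_parts += 1
--
--     file_total_size = default_total_parts
--     if file_total_size < 1:
--         file_total_size = 1
--
--     chunk = ceil(file_size / file_total_size)
--
--     for i in range(file_total_size):
--         start_byte = i * chunk
--         end_byte = start_byte + chunk
--         if end_byte > file_size:
--             end_byte = file_size
--         end_byte -= 1
--         splitted_parts.append((start_byte, end_byte))
--
--     return splitted_parts, chunk
-- ===== SOURCE B (Python) =====
-- def calc_file_chunks(file_size, min_chunk_size=None, max_chunk_size=None):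
--     mn = min_chunk_size if min_chunk_size is not None else 10 * 1024 * 1024
--     mx = max_chunk_size if max_chunk_size is not None else 100 * 1024 * 1024
--     # integer ceiling division; part count is the largest of three candidates
--     parts = max(1, min(3, -(-file_size // mn)), min(6, -(-file_size // mx)))
--     chunk = -(-file_size // parts)
--
--     def emit(start, remaining):
--         if remaining == 0:
--             return []
--         end = start + chunk
--         if end > file_size:
--             end = file_size
--         return [(start, end - 1)] + emit(start + chunk, remaining - 1)
--
--     return emit(0, parts), chunk
-- ===== Notes on version B (the rewrite author's own statement) =====
-- stated objective: simpler
-- what changed: B drops math.ceil for pure integer -(-a//b) ceiling division, collapses both convergence while-loops into one max() over three candidate part counts, and builds the byte ranges by a recursive helper that walks a running start pointer instead of A's index loop computing i*chunk.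
import Mathlib
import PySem

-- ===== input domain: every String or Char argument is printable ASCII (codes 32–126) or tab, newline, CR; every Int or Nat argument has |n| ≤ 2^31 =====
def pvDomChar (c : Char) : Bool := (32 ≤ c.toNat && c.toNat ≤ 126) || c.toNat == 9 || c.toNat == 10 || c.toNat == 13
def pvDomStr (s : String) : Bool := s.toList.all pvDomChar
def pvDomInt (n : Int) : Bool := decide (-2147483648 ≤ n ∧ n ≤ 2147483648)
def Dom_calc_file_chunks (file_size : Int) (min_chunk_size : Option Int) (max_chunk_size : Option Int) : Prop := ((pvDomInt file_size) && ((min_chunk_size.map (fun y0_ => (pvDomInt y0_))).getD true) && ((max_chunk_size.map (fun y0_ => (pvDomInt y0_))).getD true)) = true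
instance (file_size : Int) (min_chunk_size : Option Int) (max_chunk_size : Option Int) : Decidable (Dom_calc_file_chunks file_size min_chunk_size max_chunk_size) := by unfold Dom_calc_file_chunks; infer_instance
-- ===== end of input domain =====

-- B replaces A's two convergence while-loops by one max() over three candidate part
-- counts, math.ceil by integer -(-a//b), and the index loop by a recursive helper
-- walking a running start pointer (objective: simpler; same asymptotic cost).

-- ===== PORT A =====
-- math.ceil(a / b) on ints of |·| ≤ 2^31 is exact ceiling division: -((-a) // b)
def pyCeil (a b : Int) : Int := -(PySem.Int.floordiv (-a) b)

-- while ceil(fs/min) < dtp and dtp > 1: dtp -= 1    (fuel bounds the ≤ 2 iterations)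
def aLoopDown (file_size min_chunk : Int) : Int → Nat → Int
  | dtp, f + 1 =>
      if pyCeil file_size min_chunk < dtp ∧ 1 < dtp then
        aLoopDown file_size min_chunk (dtp - 1) f
      else dtp
  | dtp, 0 => dtp

-- while ceil(fs/max) > dtp and dtp < 6: dtp += 1    (fuel bounds the ≤ 5 iterations)
def aLoopUp (file_size max_chunk : Int) : Int → Nat → Int
  | dtp, f + 1 =>
      if dtp < pyCeil file_size max_chunk ∧ dtp < 6 then
        aLoopUp file_size max_chunk (dtp + 1) f
      else dtp
  | dtp, 0 => dtp

def calc_file_chunks (file_size : Int) (min_chunk_size : Option Int) (max_chunk_size : Option Int) : (List (Int × Int)) × Int :=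
  let mn := min_chunk_size.getD (10 * 1024 * 1024)
  let mx := max_chunk_size.getD (100 * 1024 * 1024)
  let dtp := aLoopDown file_size mn 3 3
  let dtp := aLoopUp file_size mx dtp 6
  let fts := if dtp < 1 then 1 else dtp
  let chunk := pyCeil file_size fts
  let parts := (PySem.List.pyRange 0 fts 1).foldl (fun acc i =>
      let start_byte := i * chunk
      let end_byte := start_byte + chunk
      let end_byte := if end_byte > file_size then file_size else end_byte
      acc ++ [(start_byte, end_byte - 1)]) []
  (parts, chunk)

-- ===== PORT B =====
-- integer ceiling division -(-a//b), exactly as Source B writes it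
def bCeilDiv (a b : Int) : Int := -(PySem.Int.floordiv (-a) b)

-- recursive emitter of Source B: walks the running start pointer, counts parts down
def bEmit (file_size chunk : Int) (start : Int) : Nat → List (Int × Int)
  | 0 => []
  | r + 1 =>
      let ed := start + chunk
      let ed := if ed > file_size then file_size else ed
      (start, ed - 1) :: bEmit file_size chunk (start + chunk) r

def calc_file_chunks_alt (file_size : Int) (min_chunk_size : Option Int) (max_chunk_size : Option Int) : (List (Int × Int)) × Int :=
  let mn := min_chunk_size.getD (10 * 1024 * 1024)
  let mx := max_chunk_size.getD (100 * 1024 * 1024)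
  let parts := max 1 (max (min 3 (bCeilDiv file_size mn)) (min 6 (bCeilDiv file_size mx)))
  let chunk := bCeilDiv file_size parts
  (bEmit file_size chunk 0 parts.toNat, chunk)

-- ===== PRECONDITION & SPEC =====
-- A (and B) raise ZeroDivisionError when an effective chunk size is 0; exactly that is excluded.
def Pre_calc_file_chunks (file_size : Int) (min_chunk_size : Option Int) (max_chunk_size : Option Int) : Prop :=
  min_chunk_size.getD (10 * 1024 * 1024) ≠ 0 ∧ max_chunk_size.getD (100 * 1024 * 1024) ≠ 0
instance (file_size : Int) (min_chunk_size : Option Int) (max_chunk_size : Option Int) : Decidable (Pre_calc_file_chunks file_size min_chunk_size max_chunk_size) := by unfold Pre_calc_file_chunks; infer_instance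
def pvWitness_calc_file_chunks : Int × Option Int × Option Int := (150, some 10, some 40)
def Spec_calc_file_chunks (file_size : Int) (min_chunk_size : Option Int) (max_chunk_size : Option Int) (out : (List (Int × Int)) × Int) : Prop := out = calc_file_chunks_alt file_size min_chunk_size max_chunk_size
instance (file_size : Int) (min_chunk_size : Option Int) (max_chunk_size : Option Int) (out : (List (Int × Int)) × Int) : Decidable (Spec_calc_file_chunks file_size min_chunk_size max_chunk_size out) := by unfold Spec_calc_file_chunks; infer_instance

-- ===== CLAIM (what is proved, stated in full; the proofs are below) =====
def Claim_equal_calc_file_chunks : Prop := ∀ (file_size : Int) (min_chunk_size : Option Int) (max_chunk_size : Option Int), Dom_calc_file_chunks file_size min_chunk_size max_chunk_size → Pre_calc_file_chunks file_size min_chunk_size max_chunk_size → Spec_calc_file_chunks file_size min_chunk_size max_chunk_size (calc_file_chunks file_size min_chunk_size max_chunk_size)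

-- ===== LEMMAS AND PROOFS =====
theorem loopDown_closed (fs mn : Int) :
    aLoopDown fs mn 3 3 = max 1 (min 3 (pyCeil fs mn)) := by
  simp only [aLoopDown]
  split_ifs <;> omega

theorem loopUp_closed (fs mx d : Int) (h1 : 1 ≤ d) (h3 : d ≤ 3) :
    aLoopUp fs mx d 6 = max d (min 6 (pyCeil fs mx)) := by
  simp only [aLoopUp]
  split_ifs <;> omega

theorem bEmit_eq_map (fs c : Int) : ∀ (r : Nat) (s : Int),
    bEmit fs c s r = (List.range r).map
      (fun (k : Nat) => (s + (k : Int) * c, (if s + (k : Int) * c + c > fs then fs else s + (k : Int) * c + c) - 1))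
  | 0, s => rfl
  | r + 1, s => by
    rw [List.range_succ_eq_map, List.map_cons, List.map_map]
    show bEmit fs c s (r + 1) = _
    rw [bEmit, bEmit_eq_map fs c r (s + c)]
    simp only [List.cons.injEq, Prod.mk.injEq]
    refine ⟨⟨by ring, by rw [show s + (0:Nat) * c + c = s + c by push_cast; ring]⟩, ?_⟩
    apply List.map_congr_left
    intro k _
    simp only [Function.comp]
    have h : s + c + (k : Int) * c = s + (k.succ : Int) * c := by push_cast; ring
    rw [h]

theorem build_eq (fs c n : Int) :
    (PySem.List.pyRange 0 n 1).foldl (fun acc i =>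
      let start_byte := i * c
      let end_byte := start_byte + c
      let end_byte := if end_byte > fs then fs else end_byte
      acc ++ [(start_byte, end_byte - 1)]) []
    = bEmit fs c 0 n.toNat := by
  rw [PySem.List.foldl_append_singleton_eq_map, bEmit_eq_map, PySem.List.pyRange_one]
  simp only [List.map_map, Int.sub_zero]
  apply List.map_congr_left
  intro k _
  simp only [Function.comp]
  have h : ((0 : Int) + (k : Int)) * c = 0 + (k : Int) * c := by ring
  rw [h]

-- ===== VERDICT (by name: the statement is the Claim_ definition above) =====
theorem calc_file_chunks_spec : Claim_equal_calc_file_chunks := by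
  intro fs mnc mxc _ hpre
  unfold Spec_calc_file_chunks calc_file_chunks calc_file_chunks_alt
  simp only []
  rw [loopDown_closed]
  rw [loopUp_closed fs _ _ (by omega) (by omega)]
  have hassoc : max (max 1 (min 3 (pyCeil fs (mnc.getD (10 * 1024 * 1024)))))
        (min 6 (pyCeil fs (mxc.getD (100 * 1024 * 1024))))
      = max 1 (max (min 3 (bCeilDiv fs (mnc.getD (10 * 1024 * 1024))))
        (min 6 (bCeilDiv fs (mxc.getD (100 * 1024 * 1024))))) := by
    unfold pyCeil bCeilDiv; omega
  set n := max 1 (max (min 3 (bCeilDiv fs (mnc.getD (10 * 1024 * 1024))))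
        (min 6 (bCeilDiv fs (mxc.getD (100 * 1024 * 1024))))) with hn
  rw [hassoc]
  have hn1 : 1 ≤ n := le_max_left _ _
  rw [if_neg (by omega)]
  rw [build_eq fs _ n]
  rfl
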